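-- pv_equiv track=rewrite | github.com/paulorodriguesxv/hackerrank | amazon/minimumNumberOfTrips.py | minimumNumberOfTrips
-- ===== SOURCE A (Python) =====
-- def minimumNumberOfTrips(tripMaxWeight, packagesWeight):
--     val = 0
--
--     trips_count = 0
--
--     for i in range(0, len(packagesWeight)):
--         trip_weight = 0
--         trip_index = i
--
--         if packagesWeight[trip_index] < 1: continue
--
--         for j in range(i, len(packagesWeight)):
--             w = packagesWeight[i] + packagesWeight[j]
--
--             if packagesWeight[j] < 1: continue
--
--             if w >= tripMaxWeight: continue
--
--             if w > trip_weight: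
--                 trip_weight = w
--                 trip_index = j
--
--         if trip_weight == 0:
--             trip_weight = packagesWeight[i]
--
--         packagesWeight[trip_index] = -packagesWeight[trip_index]
--         trips_count += 1
--     #add your code here
--     val = trips_count
--     return val
-- ===== SOURCE B (Python) =====
-- def minimumNumberOfTrips(tripMaxWeight, packagesWeight):
--     # Sorted list of (weight, index) pairs of still-available packages (ties broken
--     # by original index via the stable sort); predecessor query + deletions replace
--     # A's repeated suffix rescans.  Unlike A, the input list is NOT mutated.
--     avail = sorted([(w, i) for i, w in enumerate(packagesWeight) if w >= 1],
--                    key=lambda p: p[0])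
--     trips = 0
--     for i in range(len(packagesWeight)):
--         w = packagesWeight[i]
--         if w < 1 or (w, i) not in avail:
--             continue
--         limit = tripMaxWeight - w
--         pos = len(avail) - 1
--         while pos >= 0 and avail[pos][0] >= limit:
--             pos -= 1
--         if pos >= 0:
--             v = avail[pos][0]
--             while pos > 0 and avail[pos - 1][0] == v:
--                 pos -= 1
--             j = avail[pos][1]
--             del avail[pos]
--             if j != i:
--                 avail.remove((w, i))
--         else:
--             avail.remove((w, i))
--         trips += 1
--     return trips
-- ===== Notes on version B (the rewrite author's own statement) =====
-- stated objective: alternative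
-- what changed: A repeatedly rescans the whole suffix of the (mutated, sign-flagged) list for each leader; B builds one sorted (weight, index) list once and serves each leader with a predecessor query (largest weight below the threshold, earliest index) plus deletions, never mutating the input.
import Mathlib
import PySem

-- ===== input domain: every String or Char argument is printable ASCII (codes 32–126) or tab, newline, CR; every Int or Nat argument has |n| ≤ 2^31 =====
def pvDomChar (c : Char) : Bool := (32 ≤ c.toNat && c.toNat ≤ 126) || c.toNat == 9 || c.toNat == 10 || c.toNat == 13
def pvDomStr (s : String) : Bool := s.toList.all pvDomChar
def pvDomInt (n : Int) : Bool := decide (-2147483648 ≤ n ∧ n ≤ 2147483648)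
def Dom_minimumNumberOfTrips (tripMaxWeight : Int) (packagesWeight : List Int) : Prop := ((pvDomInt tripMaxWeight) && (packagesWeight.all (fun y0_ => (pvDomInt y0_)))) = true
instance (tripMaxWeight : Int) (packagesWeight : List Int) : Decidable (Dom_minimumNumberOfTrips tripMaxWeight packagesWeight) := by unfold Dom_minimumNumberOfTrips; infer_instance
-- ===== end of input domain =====

-- B replaces A's quadratic mutate-and-rescan greedy by one sorted (weight, index)
-- list with predecessor queries and deletions (a different algorithm; same return
-- value).  A mutates its argument in place (sign flips); B does not — the
-- equivalence proved here is about the RETURN value only.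

-- ===== PORT A =====
-- inner `for j in range(i, len(...))` loop body of A
def pvA_body (tmw : Int) (pw : List Int) (i : Nat) (st : Int × Nat) (j : Nat) : Int × Nat :=
  let w := pw.getD i 0 + pw.getD j 0
  if pw.getD j 0 < 1 then st
  else if tmw ≤ w then st
  else if st.1 < w then (w, j) else st

-- the inner loop: state (trip_weight, trip_index), started at (0, i)
-- (all indices are in range, so List.getD is exact for Python's indexing here)
def pvA_inner (tmw : Int) (pw : List Int) (i : Nat) : Int × Nat :=
  (List.range' i (pw.length - i)).foldl (pvA_body tmw pw i) (0, i)

-- one iteration of A's outer loop; state = (packagesWeight, trips_count)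
-- (A's final `trip_weight = packagesWeight[i]` write is a dead local and drops out)
def pvA_step (tmw : Int) (st : List Int × Int) (i : Nat) : List Int × Int :=
  if st.1.getD i 0 < 1 then st
  else
    let r := pvA_inner tmw st.1 i
    (st.1.set r.2 (-(st.1.getD r.2 0)), st.2 + 1)

def minimumNumberOfTrips (tripMaxWeight : Int) (packagesWeight : List Int) : Int :=
  ((List.range packagesWeight.length).foldl (pvA_step tripMaxWeight) (packagesWeight, 0)).2

-- ===== PORT B =====
-- `while pos >= 0 and avail[pos][0] >= limit: pos -= 1`, called with pos = len-1;
-- the Nat argument is pos+1, the returned value is the final pos (as a Python int)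
def pvB_scanDown (limit : Int) (avail : List (Int × Int)) : Nat → Int
  | 0 => -1
  | p + 1 => if limit ≤ (avail.getD p (0, 0)).1 then pvB_scanDown limit avail p else (p : Int)

-- `while pos > 0 and avail[pos-1][0] == v: pos -= 1`
def pvB_scanLeft (v : Int) (avail : List (Int × Int)) : Nat → Nat
  | 0 => 0
  | p + 1 => if (avail.getD p (0, 0)).1 = v then pvB_scanLeft v avail p else p + 1

-- `sorted([(w, i) for i, w in enumerate(packagesWeight) if w >= 1], key=lambda p: p[0])`
def pvB_avail (pw : List Int) : List (Int × Int) :=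
  PySem.List.sorted (((PySem.List.enumerate pw).filter (fun p => decide (1 ≤ p.2))).map
    (fun p => (p.2, p.1))) (fun p => p.1) false

-- one iteration of B's loop; state = (avail, trips).  The two `remove` calls can
-- never raise (the element was membership-checked), so `.getD` is exact there.
def pvB_step (tmw : Int) (pw : List Int) (st : List (Int × Int) × Int) (i : Nat) :
    List (Int × Int) × Int :=
  let w := pw.getD i 0
  if w < 1 ∨ (w, (i : Int)) ∉ st.1 then st
  else
    let limit := tmw - w
    let pos := pvB_scanDown limit st.1 st.1.length
    if 0 ≤ pos then
      let v := (st.1.getD pos.toNat (0, 0)).1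
      let p' := pvB_scanLeft v st.1 pos.toNat
      let j := (st.1.getD p' (0, 0)).2
      let avail' := st.1.eraseIdx p'
      if j ≠ (i : Int) then ((PySem.List.remove? avail' (w, (i : Int))).getD avail', st.2 + 1)
      else (avail', st.2 + 1)
    else ((PySem.List.remove? st.1 (w, (i : Int))).getD st.1, st.2 + 1)

def minimumNumberOfTrips_alt (tripMaxWeight : Int) (packagesWeight : List Int) : Int :=
  ((List.range packagesWeight.length).foldl (pvB_step tripMaxWeight packagesWeight)
    (pvB_avail packagesWeight, 0)).2

-- ===== PRECONDITION & SPEC =====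
def Spec_minimumNumberOfTrips (tripMaxWeight : Int) (packagesWeight : List Int) (out : Int) : Prop := out = minimumNumberOfTrips_alt tripMaxWeight packagesWeight
instance (tripMaxWeight : Int) (packagesWeight : List Int) (out : Int) : Decidable (Spec_minimumNumberOfTrips tripMaxWeight packagesWeight out) := by unfold Spec_minimumNumberOfTrips; infer_instance

-- ===== CLAIM (what is proved, stated in full; the proofs are below) =====
def Claim_equal_minimumNumberOfTrips : Prop := ∀ (tripMaxWeight : Int) (packagesWeight : List Int), Dom_minimumNumberOfTrips tripMaxWeight packagesWeight → Spec_minimumNumberOfTrips tripMaxWeight packagesWeight (minimumNumberOfTrips tripMaxWeight packagesWeight)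

-- ===== LEMMAS AND PROOFS =====

-- getD on an in-range index
theorem pvGetD_int (l : List Int) (p : Nat) (h : p < l.length) : l.getD p 0 = l[p] := by
  simp [List.getD_eq_getElem?_getD, List.getElem?_eq_getElem h]

theorem pvGetD_pair (l : List (Int × Int)) (p : Nat) (h : p < l.length) :
    l.getD p (0, 0) = l[p] := by
  simp [List.getD_eq_getElem?_getD, List.getElem?_eq_getElem h]

theorem pvGetD_set (l : List Int) (k j : Nat) (a : Int) (hj : j < l.length) :
    (l.set k a).getD j 0 = if k = j then a else l.getD j 0 := by
  by_cases hkj : k = j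
  · subst hkj
    simp [List.getD_eq_getElem?_getD, hj]
  · simp [List.getD_eq_getElem?_getD, List.getElem?_set_ne hkj, hkj]

-- the strict lexicographic order on (weight, index) pairs
def pvLex (a b : Int × Int) : Prop := a.1 < b.1 ∨ (a.1 = b.1 ∧ a.2 < b.2)

theorem pvLex_nodup {av : List (Int × Int)} (h : av.Pairwise pvLex) : av.Nodup :=
  h.imp (fun hab => by
    rintro rfl
    rcases hab with h | ⟨_, h⟩ <;> exact absurd h (lt_irrefl _))

-- A's loop invariant relating its (mutated) list to B's available multiset
def pvInv (pw0 : List Int) (i : Nat) (pw : List Int) (av : List (Int × Int)) : Prop :=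
  pw.length = pw0.length ∧
  av.Pairwise pvLex ∧
  (∀ j : Nat, i ≤ j → j < pw0.length → 1 ≤ pw.getD j 0 → pw.getD j 0 = pw0.getD j 0) ∧
  (∀ x : Int × Int, x ∈ av ↔
    ∃ j : Nat, j < pw0.length ∧ i ≤ j ∧ 1 ≤ pw.getD j 0 ∧ x = (pw.getD j 0, (j : Int)))

-- which j qualify as trip partner for leader i
def pvQual (tmw : Int) (pw : List Int) (i j : Nat) : Prop :=
  1 ≤ pw.getD j 0 ∧ pw.getD i 0 + pw.getD j 0 < tmw

-- characterisation of the state of A's inner loop after scanning j ∈ [i, k)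
def pvGood (tmw : Int) (pw : List Int) (i k : Nat) (st : Int × Nat) : Prop :=
  (st = (0, i) ∧ ∀ j, i ≤ j → j < k → ¬ pvQual tmw pw i j) ∨
  (i ≤ st.2 ∧ st.2 < k ∧ pvQual tmw pw i st.2 ∧
    st.1 = pw.getD i 0 + pw.getD st.2 0 ∧ 0 < st.1 ∧
    ∀ j, i ≤ j → j < k → pvQual tmw pw i j →
      (pw.getD j 0 < pw.getD st.2 0 ∨ (pw.getD j 0 = pw.getD st.2 0 ∧ st.2 ≤ j)))

theorem pvGood_step (tmw : Int) (pw : List Int) (i k : Nat) (st : Int × Nat)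
    (hik : i ≤ k) (hpi : 1 ≤ pw.getD i 0) (h : pvGood tmw pw i k st) :
    pvGood tmw pw i (k + 1) (pvA_body tmw pw i st k) := by
  obtain ⟨s1, s2⟩ := st
  simp only [pvA_body]
  by_cases h1 : pw.getD k 0 < 1
  · rw [if_pos h1]
    simp only [pvGood] at h ⊢
    rcases h with ⟨he, hno⟩ | ⟨g2, g3, g4, g5, g6, g7⟩
    · refine Or.inl ⟨he, fun j hj hjk hq => ?_⟩
      rcases Nat.lt_or_ge j k with hlt | hge
      · exact hno j hj hlt hq
      · have hjk' : j = k := by omega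
        rw [hjk'] at hq
        obtain ⟨hq1, _⟩ := hq
        omega
    · refine Or.inr ⟨g2, by omega, g4, g5, g6, fun j hj hjk hq => ?_⟩
      rcases Nat.lt_or_ge j k with hlt | hge
      · exact g7 j hj hlt hq
      · have hjk' : j = k := by omega
        rw [hjk'] at hq ⊢
        obtain ⟨hq1, _⟩ := hq
        omega
  · rw [if_neg h1]
    by_cases h2 : tmw ≤ pw.getD i 0 + pw.getD k 0
    · rw [if_pos h2]
      simp only [pvGood] at h ⊢
      rcases h with ⟨he, hno⟩ | ⟨g2, g3, g4, g5, g6, g7⟩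
      · refine Or.inl ⟨he, fun j hj hjk hq => ?_⟩
        rcases Nat.lt_or_ge j k with hlt | hge
        · exact hno j hj hlt hq
        · have hjk' : j = k := by omega
          rw [hjk'] at hq
          obtain ⟨_, hq2⟩ := hq
          omega
      · refine Or.inr ⟨g2, by omega, g4, g5, g6, fun j hj hjk hq => ?_⟩
        rcases Nat.lt_or_ge j k with hlt | hge
        · exact g7 j hj hlt hq
        · have hjk' : j = k := by omega
          rw [hjk'] at hq ⊢
          obtain ⟨_, hq2⟩ := hq
          omega
    · rw [if_neg h2]
      have hqk : pvQual tmw pw i k := ⟨by omega, by omega⟩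
      by_cases h3 : s1 < pw.getD i 0 + pw.getD k 0
      · rw [if_pos h3]
        simp only [pvGood] at h ⊢
        refine Or.inr ⟨hik, by omega, hqk, by trivial, by omega, fun j hj hjk hq => ?_⟩
        rcases Nat.lt_or_ge j k with hlt | hge
        · rcases h with ⟨he, hno⟩ | ⟨g2, g3, g4, g5, g6, g7⟩
          · exact absurd hq (hno j hj hlt)
          · rcases g7 j hj hlt hq with hl | ⟨heq, _⟩
            · exact Or.inl (by omega)
            · exact Or.inl (by omega)
        · have hjk' : j = k := by omega
          rw [hjk']
          exact Or.inr ⟨rfl, le_rfl⟩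
      · rw [if_neg h3]
        simp only [pvGood] at h ⊢
        rcases h with ⟨he, hno⟩ | ⟨g2, g3, g4, g5, g6, g7⟩
        · exfalso
          have hs1 : s1 = 0 := by
            have h4 := congrArg Prod.fst he
            simpa using h4
          have h5 := hqk.1
          omega
        · refine Or.inr ⟨g2, by omega, g4, g5, g6, fun j hj hjk hq => ?_⟩
          rcases Nat.lt_or_ge j k with hlt | hge
          · exact g7 j hj hlt hq
          · have hjk' : j = k := by omega
            rw [hjk'] at hq ⊢
            have hle : pw.getD k 0 ≤ pw.getD s2 0 := by omega
            rcases lt_or_eq_of_le hle with hl | heq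
            · exact Or.inl hl
            · exact Or.inr ⟨heq, by omega⟩

theorem pvGood_fold (tmw : Int) (pw : List Int) (i : Nat) (hpi : 1 ≤ pw.getD i 0) :
    ∀ m : Nat, pvGood tmw pw i (i + m)
      ((List.range' i m).foldl (pvA_body tmw pw i) (0, i)) := by
  intro m
  induction m with
  | zero =>
    simp only [pvGood]
    exact Or.inl ⟨rfl, fun j hj hjk _ => absurd hjk (by omega)⟩
  | succ m ih =>
    have hsplit : List.range' i (m + 1) = List.range' i m ++ [i + m] := by
      have h := List.range'_append (s := i) (m := m) (n := 1) (step := 1)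
      simp only [one_mul, List.range'_one] at h
      exact h.symm
    rw [hsplit, List.foldl_append, List.foldl_cons, List.foldl_nil]
    exact pvGood_step tmw pw i (i + m) _ (by omega) hpi ih

theorem pvA_inner_good (tmw : Int) (pw : List Int) (i : Nat)
    (hi : i ≤ pw.length) (hpi : 1 ≤ pw.getD i 0) :
    pvGood tmw pw i pw.length (pvA_inner tmw pw i) := by
  have h := pvGood_fold tmw pw i hpi (pw.length - i)
  unfold pvA_inner
  rwa [Nat.add_sub_cancel' hi] at h

theorem pvScanDown_spec (limit : Int) (l : List (Int × Int)) :
    ∀ k : Nat,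
      (pvB_scanDown limit l k = -1 ∧ ∀ p, p < k → limit ≤ (l.getD p (0, 0)).1) ∨
      (∃ p : Nat, pvB_scanDown limit l k = (p : Int) ∧ p < k ∧ (l.getD p (0, 0)).1 < limit ∧
        ∀ q, p < q → q < k → limit ≤ (l.getD q (0, 0)).1) := by
  intro k
  induction k with
  | zero => exact Or.inl ⟨rfl, fun p hp => absurd hp (by omega)⟩
  | succ k ih =>
    have e : pvB_scanDown limit l (k + 1) =
        if limit ≤ (l.getD k (0, 0)).1 then pvB_scanDown limit l k else (k : Int) := rfl
    by_cases hk : limit ≤ (l.getD k (0, 0)).1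
    · rw [e, if_pos hk]
      rcases ih with ⟨h, hall⟩ | ⟨p, heq, hpk, hv, habove⟩
      · refine Or.inl ⟨h, fun p hp => ?_⟩
        rcases Nat.lt_or_ge p k with hlt | hge
        · exact hall p hlt
        · have hpk' : p = k := by omega
          subst hpk'; exact hk
      · refine Or.inr ⟨p, heq, by omega, hv, fun q h1 h2 => ?_⟩
        rcases Nat.lt_or_ge q k with hlt | hge
        · exact habove q h1 hlt
        · have hqk : q = k := by omega
          subst hqk; exact hk
    · rw [e, if_neg hk]
      exact Or.inr ⟨k, rfl, by omega, by omega, fun q h1 h2 => by omega⟩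

theorem pvScanLeft_spec (v : Int) (l : List (Int × Int)) :
    ∀ p : Nat, pvB_scanLeft v l p ≤ p ∧
      (∀ q, pvB_scanLeft v l p ≤ q → q < p → (l.getD q (0, 0)).1 = v) ∧
      (pvB_scanLeft v l p = 0 ∨ (l.getD (pvB_scanLeft v l p - 1) (0, 0)).1 ≠ v) := by
  intro p
  induction p with
  | zero => exact ⟨le_rfl, fun q _ hq => absurd hq (by omega), Or.inl rfl⟩
  | succ p ih =>
    have e : pvB_scanLeft v l (p + 1) =
        if (l.getD p (0, 0)).1 = v then pvB_scanLeft v l p else p + 1 := rfl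
    by_cases hp : (l.getD p (0, 0)).1 = v
    · rw [e, if_pos hp]
      obtain ⟨h1, h2, h3⟩ := ih
      refine ⟨by omega, fun q hq1 hq2 => ?_, h3⟩
      rcases Nat.lt_or_ge q p with hlt | hge
      · exact h2 q hq1 hlt
      · have hqp : q = p := by omega
        subst hqp; exact hp
    · rw [e, if_neg hp]
      refine ⟨le_rfl, fun q hq1 hq2 => by omega, Or.inr ?_⟩
      simpa using hp

theorem pvEraseIdx_eq_erase :
    ∀ (l : List (Int × Int)) (p : Nat), l.Nodup → (hp : p < l.length) →
      l.eraseIdx p = l.erase l[p] := by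
  intro l
  induction l with
  | nil => intro p _ hp; simp at hp
  | cons x xs ih =>
    intro p hnd hp
    cases p with
    | zero => simp
    | succ p =>
      have hlen : p < xs.length := by simpa using hp
      have hxm : x ∉ xs := (List.nodup_cons.mp hnd).1
      have hx : x ≠ xs[p] := by
        intro he
        rw [he] at hxm
        exact hxm (List.getElem_mem hlen)
      simp only [List.eraseIdx_cons_succ, List.getElem_cons_succ]
      rw [List.erase_cons_tail (by simpa using hx), ih p (List.nodup_cons.mp hnd).2 hlen]

-- ---- preservation of the invariant ----

theorem pvInv_next_skip (pw0 pw : List Int) (av : List (Int × Int)) (i : Nat)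
    (hInv : pvInv pw0 i pw av) (hskip : pw.getD i 0 < 1) :
    pvInv pw0 (i + 1) pw av := by
  obtain ⟨hlen, hpair, hc, hmem⟩ := hInv
  refine ⟨hlen, hpair, fun j hj hjn hp => hc j (by omega) hjn hp, fun x => ?_⟩
  constructor
  · intro hx
    obtain ⟨j, hjn, hij, hjp, hxe⟩ := (hmem x).mp hx
    refine ⟨j, hjn, ?_, hjp, hxe⟩
    rcases Nat.lt_or_ge i j with hlt | hge
    · omega
    · have hji : j = i := by omega
      subst hji
      omega
  · rintro ⟨j, hjn, hij, hjp, hxe⟩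
    exact (hmem x).mpr ⟨j, hjn, by omega, hjp, hxe⟩

theorem pvInv_next_self (pw0 pw : List Int) (av : List (Int × Int)) (i : Nat)
    (hInv : pvInv pw0 i pw av) (hin : i < pw0.length) (hpi : 1 ≤ pw.getD i 0) :
    pvInv pw0 (i + 1) (pw.set i (-(pw.getD i 0)))
      (av.erase (pw0.getD i 0, (i : Int))) := by
  obtain ⟨hlen, hpair, hc, hmem⟩ := hInv
  have hnd : av.Nodup := pvLex_nodup hpair
  have hw0 : pw.getD i 0 = pw0.getD i 0 := hc i le_rfl hin hpi
  refine ⟨by simpa using hlen, List.Pairwise.sublist List.erase_sublist hpair, ?_, ?_⟩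
  · intro j hj hjn hp
    have hjlen : j < pw.length := by omega
    rw [pvGetD_set pw i j _ hjlen] at hp ⊢
    rw [if_neg (by omega)] at hp ⊢
    exact hc j (by omega) hjn hp
  · intro x
    rw [hnd.mem_erase_iff]
    constructor
    · rintro ⟨hne, hx⟩
      obtain ⟨j, hjn, hij, hjp, hxe⟩ := (hmem x).mp hx
      have hji : j ≠ i := by
        rintro rfl
        exact hne (by rw [hxe, hw0])
      have hjlen : j < pw.length := by omega
      refine ⟨j, hjn, by omega, ?_, ?_⟩
      · rw [pvGetD_set pw i j _ hjlen, if_neg (by omega)]; exact hjp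
      · rw [pvGetD_set pw i j _ hjlen, if_neg (by omega)]; exact hxe
    · rintro ⟨j, hjn, hij, hjp, hxe⟩
      have hjlen : j < pw.length := by omega
      rw [pvGetD_set pw i j _ hjlen, if_neg (by omega)] at hjp hxe
      refine ⟨?_, (hmem x).mpr ⟨j, hjn, by omega, hjp, hxe⟩⟩
      rw [hxe]
      intro he
      have h5 := congrArg Prod.snd he
      simp at h5
      omega

theorem pvInv_next_pair (pw0 pw : List Int) (av : List (Int × Int)) (i t : Nat)
    (hInv : pvInv pw0 i pw av) (hin : i < pw0.length) (hpi : 1 ≤ pw.getD i 0)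
    (hti : i ≤ t) (htn : t < pw0.length) (hlt : 1 ≤ pw.getD t 0) (hne : t ≠ i) :
    pvInv pw0 (i + 1) (pw.set t (-(pw.getD t 0)))
      ((av.erase (pw.getD t 0, (t : Int))).erase (pw0.getD i 0, (i : Int))) := by
  obtain ⟨hlen, hpair, hc, hmem⟩ := hInv
  have hnd : av.Nodup := pvLex_nodup hpair
  have hnd2 : (av.erase (pw.getD t 0, (t : Int))).Nodup :=
    List.Nodup.sublist List.erase_sublist hnd
  have hw0 : pw.getD i 0 = pw0.getD i 0 := hc i le_rfl hin hpi
  refine ⟨by simpa using hlen,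
    List.Pairwise.sublist List.erase_sublist
      (List.Pairwise.sublist List.erase_sublist hpair), ?_, ?_⟩
  · intro j hj hjn hp
    have hjlen : j < pw.length := by omega
    rw [pvGetD_set pw t j _ hjlen] at hp ⊢
    by_cases hjt : t = j
    · rw [if_pos hjt] at hp; omega
    · rw [if_neg hjt] at hp ⊢
      exact hc j (by omega) hjn hp
  · intro x
    rw [hnd2.mem_erase_iff, hnd.mem_erase_iff]
    constructor
    · rintro ⟨hnei, hnet, hx⟩
      obtain ⟨j, hjn, hij, hjp, hxe⟩ := (hmem x).mp hx
      have hji : j ≠ i := by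
        rintro rfl
        exact hnei (by rw [hxe, hw0])
      have hjt : j ≠ t := by
        rintro rfl
        exact hnet hxe
      have hjlen : j < pw.length := by omega
      refine ⟨j, hjn, by omega, ?_, ?_⟩
      · rw [pvGetD_set pw t j _ hjlen, if_neg (by omega)]; exact hjp
      · rw [pvGetD_set pw t j _ hjlen, if_neg (by omega)]; exact hxe
    · rintro ⟨j, hjn, hij, hjp, hxe⟩
      have hjlen : j < pw.length := by omega
      have hjt : j ≠ t := by
        rintro rfl
        rw [pvGetD_set pw j j _ hjlen, if_pos rfl] at hjp
        omega
      rw [pvGetD_set pw t j _ hjlen, if_neg (by omega)] at hjp hxe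
      refine ⟨?_, ?_, (hmem x).mpr ⟨j, hjn, by omega, hjp, hxe⟩⟩
      · rw [hxe]
        intro he
        have h5 := congrArg Prod.snd he
        simp at h5
        omega
      · rw [hxe]
        intro he
        have h5 := congrArg Prod.snd he
        simp at h5
        omega

-- ---- the selection argument: B's predecessor query picks exactly A's partner ----

theorem pvSelect (tmw : Int) (pw0 pw : List Int) (av : List (Int × Int)) (i : Nat)
    (hInv : pvInv pw0 i pw av) (hin : i < pw0.length) (hpi : 1 ≤ pw.getD i 0) :
    (pvB_scanDown (tmw - pw.getD i 0) av av.length = -1 ∧ pvA_inner tmw pw i = (0, i)) ∨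
    (∃ p j : Nat, pvB_scanDown (tmw - pw.getD i 0) av av.length = (p : Int) ∧
      p < av.length ∧ i ≤ j ∧ j < pw0.length ∧ 1 ≤ pw.getD j 0 ∧
      pvA_inner tmw pw i = (pw.getD i 0 + pw.getD j 0, j) ∧
      pvB_scanLeft ((av.getD p (0, 0)).1) av p < av.length ∧
      av.getD (pvB_scanLeft ((av.getD p (0, 0)).1) av p) (0, 0)
        = (pw.getD j 0, (j : Int))) := by
  obtain ⟨hlen, hpair, hc, hmem⟩ := hInv
  have hgood : pvGood tmw pw i pw.length (pvA_inner tmw pw i) :=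
    pvA_inner_good tmw pw i (by omega) hpi
  have hpairget : ∀ (p q : Nat) (hp : p < av.length) (hq : q < av.length),
      p < q → pvLex av[p] av[q] :=
    fun p q hp hq hpq => List.pairwise_iff_getElem.mp hpair p q hp hq hpq
  have hmono : ∀ (p q : Nat) (hp : p < av.length) (hq : q < av.length),
      p ≤ q → av[p].1 ≤ av[q].1 := by
    intro p q hp hq hpq
    rcases Nat.lt_or_ge p q with hlt | hge
    · rcases hpairget p q hp hq hlt with h | ⟨h, _⟩
      · exact le_of_lt h
      · exact le_of_eq h
    · have hpq' : p = q := by omega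
      subst hpq'; exact le_rfl
  have hval : ∀ (p : Nat) (hp : p < av.length), ∃ j : Nat, j < pw0.length ∧ i ≤ j ∧
      1 ≤ pw.getD j 0 ∧ av[p] = (pw.getD j 0, (j : Int)) :=
    fun p hp => (hmem av[p]).mp (List.getElem_mem hp)
  rcases pvScanDown_spec (tmw - pw.getD i 0) av av.length with
    ⟨hsd, hall⟩ | ⟨p, hsd, hplen, hpv, habove⟩
  · left
    refine ⟨hsd, ?_⟩
    rcases hgood with ⟨h0, _⟩ | ⟨hij, hjn, hq, hv1, _, hmax⟩
    · exact h0
    · exfalso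
      set j := (pvA_inner tmw pw i).2 with hjdef
      have hq1 := hq.1
      have hq2 := hq.2
      have hjn0 : j < pw0.length := by omega
      have hx : (pw.getD j 0, (j : Int)) ∈ av := (hmem _).mpr ⟨j, hjn0, hij, hq1, rfl⟩
      obtain ⟨t, htlen, hxt⟩ := List.getElem_of_mem hx
      have hxt1 : av[t].1 = pw.getD j 0 := by rw [hxt]
      have h2 := hall t htlen
      rw [pvGetD_pair av t htlen, hxt1] at h2
      omega
  · right
    obtain ⟨j0, hj0n, hij0, hj0p, hpj0⟩ := hval p hplen
    have hpj0_1 : av[p].1 = pw.getD j0 0 := by rw [hpj0]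
    have hpv1 : av[p].1 < tmw - pw.getD i 0 := by
      rwa [pvGetD_pair av p hplen] at hpv
    have hq0 : pvQual tmw pw i j0 := ⟨hj0p, by omega⟩
    rcases hgood with ⟨_, hnone⟩ | ⟨hij, hjn, hq, hv1, _, hmax⟩
    · exact absurd hq0 (hnone j0 hij0 (by omega))
    set j := (pvA_inner tmw pw i).2 with hjdef
    have hq1 := hq.1
    have hq2 := hq.2
    have hjn0 : j < pw0.length := by omega
    have hx : (pw.getD j 0, (j : Int)) ∈ av := (hmem _).mpr ⟨j, hjn0, hij, hq1, rfl⟩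
    obtain ⟨t, htlen, hxt⟩ := List.getElem_of_mem hx
    have hxt1 : av[t].1 = pw.getD j 0 := by rw [hxt]
    have hxt2 : av[t].2 = (j : Int) := by rw [hxt]
    have hjlim : pw.getD j 0 < tmw - pw.getD i 0 := by omega
    have htp : t ≤ p := by
      by_contra hcon
      have h2 := habove t (by omega) htlen
      rw [pvGetD_pair av t htlen, hxt1] at h2
      omega
    have hvp_ge : pw.getD j 0 ≤ av[p].1 := by
      rw [← hxt1]; exact hmono t p htlen hplen htp
    have hvp_le : av[p].1 ≤ pw.getD j 0 := by
      rw [hpj0_1]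
      rcases hmax j0 hij0 (by omega) hq0 with h | ⟨h, _⟩
      · omega
      · omega
    have hveq : av[p].1 = pw.getD j 0 := le_antisymm hvp_le hvp_ge
    have hv' : (av.getD p (0, 0)).1 = pw.getD j 0 := by
      rw [pvGetD_pair av p hplen]; exact hveq
    obtain ⟨hp'le, hblock, hleft⟩ := pvScanLeft_spec ((av.getD p (0, 0)).1) av p
    set p' := pvB_scanLeft ((av.getD p (0, 0)).1) av p with hp'def
    have hp'len : p' < av.length := by omega
    have hvp'' : av[p'].1 = pw.getD j 0 := by
      rcases Nat.lt_or_ge p' p with hlt | hge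
      · have h3 := hblock p' le_rfl hlt
        rw [pvGetD_pair av p' hp'len] at h3
        rw [h3]; exact hv'
      · have hpp : p' = p := by omega
        have hpe : av[p'] = av[p] := by simp only [hpp]
        rw [hpe]; exact hveq
    have hp't : p' ≤ t := by
      by_contra hcon
      rcases hleft with h0 | hne0
      · omega
      · have hb1 : p' - 1 < av.length := by omega
        have hm1 : av[t].1 ≤ av[p' - 1].1 := hmono t (p' - 1) htlen hb1 (by omega)
        have hm2 : av[p' - 1].1 ≤ av[p].1 := hmono (p' - 1) p hb1 hplen (by omega)
        rw [pvGetD_pair av (p' - 1) hb1, hv'] at hne0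
        rw [hxt1] at hm1
        omega
    obtain ⟨j1, hj1n, hij1, hj1p, hpj1⟩ := hval p' hp'len
    have hpj1_1 : av[p'].1 = pw.getD j1 0 := by rw [hpj1]
    have hpj1_2 : av[p'].2 = (j1 : Int) := by rw [hpj1]
    have hvj1 : pw.getD j1 0 = pw.getD j 0 := by omega
    have hq1' : pvQual tmw pw i j1 := ⟨hj1p, by omega⟩
    have hjj1 : j ≤ j1 := by
      rcases hmax j1 hij1 (by omega) hq1' with h | ⟨_, h⟩
      · omega
      · exact h
    have hj1j : j1 ≤ j := by
      rcases Nat.lt_or_ge p' t with hlt | hge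
      · rcases hpairget p' t hp'len htlen hlt with h | ⟨_, h⟩
        · rw [hpj1_1, hxt1] at h; omega
        · rw [hpj1_2, hxt2] at h; omega
      · have hpt : p' = t := by omega
        simp only [hpt] at hpj1_2
        rw [hxt2] at hpj1_2
        omega
    have hj1 : j1 = j := by omega
    refine ⟨p, j, hsd, hplen, hij, hjn0, hq1, ?_, hp'len, ?_⟩
    · have heta : pvA_inner tmw pw i = ((pvA_inner tmw pw i).1, (pvA_inner tmw pw i).2) := rfl
      rw [heta, hv1, ← hjdef]
    · rw [pvGetD_pair av p' hp'len, hpj1, hj1]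

-- ---- one synchronized step ----

theorem pvStep (tmw : Int) (pw0 pw : List Int) (av : List (Int × Int)) (c : Int) (i : Nat)
    (hInv : pvInv pw0 i pw av) (hin : i < pw0.length) :
    (pvA_step tmw (pw, c) i).2 = (pvB_step tmw pw0 (av, c) i).2 ∧
    pvInv pw0 (i + 1) (pvA_step tmw (pw, c) i).1 (pvB_step tmw pw0 (av, c) i).1 := by
  obtain ⟨hlen, hpair, hc, hmem⟩ := hInv
  have hInv' : pvInv pw0 i pw av := ⟨hlen, hpair, hc, hmem⟩
  have hnd : av.Nodup := pvLex_nodup hpair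
  by_cases hskip : pw.getD i 0 < 1
  · -- skip case on both sides
    have hguard : pw0.getD i 0 < 1 ∨ (pw0.getD i 0, (i : Int)) ∉ av := by
      by_cases hw0 : pw0.getD i 0 < 1
      · exact Or.inl hw0
      · refine Or.inr ?_
        intro hmm
        obtain ⟨j, hjn, hij, hjp, hxe⟩ := (hmem _).mp hmm
        have h5 := congrArg Prod.snd hxe
        simp at h5
        have hji : j = i := by omega
        subst hji
        have h6 := congrArg Prod.fst hxe
        simp at h6
        omega
    have hA : pvA_step tmw (pw, c) i = (pw, c) := by
      simp only [pvA_step]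
      rw [if_pos hskip]
    have hB : pvB_step tmw pw0 (av, c) i = (av, c) := by
      simp only [pvB_step]
      rw [if_pos hguard]
    rw [hA, hB]
    exact ⟨rfl, pvInv_next_skip pw0 pw av i hInv' hskip⟩
  · have hskip' : 1 ≤ pw.getD i 0 := by omega
    clear hskip
    have hskip := hskip'
    have hw0 : pw.getD i 0 = pw0.getD i 0 := hc i le_rfl hin hskip
    have hmemi : (pw0.getD i 0, (i : Int)) ∈ av :=
      (hmem _).mpr ⟨i, hin, le_rfl, hskip, by rw [hw0]⟩
    have hguard : ¬ (pw0.getD i 0 < 1 ∨ (pw0.getD i 0, (i : Int)) ∉ av) :=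
      not_or.mpr ⟨by omega, fun hh => hh hmemi⟩
    have hA0 : pvA_step tmw (pw, c) i =
        (pw.set (pvA_inner tmw pw i).2 (-(pw.getD (pvA_inner tmw pw i).2 0)), c + 1) := by
      simp only [pvA_step]
      rw [if_neg (by omega)]
    have hlimit : tmw - pw0.getD i 0 = tmw - pw.getD i 0 := by rw [hw0]
    rcases pvSelect tmw pw0 pw av i hInv' hin hskip with
      ⟨hsd, hAi⟩ | ⟨p, j, hsd, hplen, hij, hjn, hjp, hAi, hp'len, hp'val⟩
    · -- no candidate: A does a solo trip on i, B removes (w, i)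
      have hB : pvB_step tmw pw0 (av, c) i =
          (av.erase (pw0.getD i 0, (i : Int)), c + 1) := by
        simp only [pvB_step]
        rw [if_neg hguard, hlimit, hsd]
        rw [if_neg (by norm_num)]
        rw [PySem.List.remove?_eq_some_erase av _ hmemi]
        rfl
      rw [hA0, hB, hAi]
      refine ⟨rfl, ?_⟩
      simpa using pvInv_next_self pw0 pw av i hInv' hin hskip
    · -- a partner exists: A pairs i with j, B deletes the pair (and i's entry if j ≠ i)
      have hp'get : av[pvB_scanLeft ((av.getD p (0, 0)).1) av p]'hp'len
          = (pw.getD j 0, (j : Int)) := by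
        rw [← pvGetD_pair av _ hp'len, hp'val]
      have heraseIdx : av.eraseIdx (pvB_scanLeft ((av.getD p (0, 0)).1) av p)
          = av.erase (pw.getD j 0, (j : Int)) := by
        rw [pvEraseIdx_eq_erase av _ hnd hp'len, hp'get]
      by_cases hji : j = i
      · -- the chosen partner is i itself
        have hcond0 : ¬ (((pw.getD j 0 : Int), (j : Int)).2 ≠ (i : Int)) :=
          fun h5 => h5 (by rw [hji])
        have hB : pvB_step tmw pw0 (av, c) i =
            (av.erase (pw0.getD i 0, (i : Int)), c + 1) := by
          simp only [pvB_step]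
          rw [if_neg hguard, hlimit, hsd]
          rw [if_pos (Int.natCast_nonneg p)]
          rw [Int.toNat_natCast, hp'val]
          rw [if_neg hcond0]
          rw [heraseIdx, hji, hw0]
        rw [hA0, hB, hAi]
        refine ⟨rfl, ?_⟩
        simpa [hji] using pvInv_next_self pw0 pw av i hInv' hin hskip
      · have hmem2 : (pw0.getD i 0, (i : Int)) ∈ av.erase (pw.getD j 0, (j : Int)) := by
          rw [hnd.mem_erase_iff]
          refine ⟨?_, hmemi⟩
          intro he
          have h5 := congrArg Prod.snd he
          simp at h5
          omega
        have hcond : ((pw.getD j 0 : Int), (j : Int)).2 ≠ (i : Int) :=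
          fun h5 => hji (Nat.cast_inj.mp h5)
        have hB : pvB_step tmw pw0 (av, c) i =
            ((av.erase (pw.getD j 0, (j : Int))).erase (pw0.getD i 0, (i : Int)), c + 1) := by
          simp only [pvB_step]
          rw [if_neg hguard, hlimit, hsd]
          rw [if_pos (Int.natCast_nonneg p)]
          rw [Int.toNat_natCast, hp'val]
          rw [if_pos hcond]
          rw [heraseIdx]
          rw [PySem.List.remove?_eq_some_erase _ _ hmem2]
          rfl
        rw [hA0, hB, hAi]
        refine ⟨rfl, ?_⟩
        simpa using pvInv_next_pair pw0 pw av i j hInv' hin hskip hij hjn hjp hji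

-- ---- the outer loops advance in lockstep ----

theorem pvOuter (tmw : Int) (pw0 : List Int) :
    ∀ (m i : Nat) (pw : List Int) (av : List (Int × Int)) (c : Int),
      i + m ≤ pw0.length → pvInv pw0 i pw av →
      ((List.range' i m).foldl (pvA_step tmw) (pw, c)).2
        = ((List.range' i m).foldl (pvB_step tmw pw0) (av, c)).2 := by
  intro m
  induction m with
  | zero => intro i pw av c h hInv; simp
  | succ m ih =>
    intro i pw av c h hInv
    rw [List.range'_succ, List.foldl_cons, List.foldl_cons]
    have hin : i < pw0.length := by omega
    obtain ⟨hcnt, hInv'⟩ := pvStep tmw pw0 pw av c i hInv hin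
    have eA : pvA_step tmw (pw, c) i
        = ((pvA_step tmw (pw, c) i).1, (pvA_step tmw (pw, c) i).2) := rfl
    have eB : pvB_step tmw pw0 (av, c) i
        = ((pvB_step tmw pw0 (av, c) i).1, (pvA_step tmw (pw, c) i).2) := by
      rw [hcnt]
    rw [eA, eB]
    exact ih (i + 1) _ _ _ (by omega) hInv'

-- ---- initial invariant ----

theorem pvInsertBy_lex (x : Int × Int) (acc : List (Int × Int))
    (hs : acc.Pairwise pvLex) (hgt : ∀ y ∈ acc, y.2 < x.2) :
    (PySem.List.insertBy (fun a b => decide (a.1 < b.1)) x acc).Pairwise pvLex := by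
  induction acc with
  | nil => simp [PySem.List.insertBy, pvLex]
  | cons y ys ih =>
    have e : PySem.List.insertBy (fun a b => decide (a.1 < b.1)) x (y :: ys)
        = if decide (x.1 < y.1) then x :: y :: ys
          else y :: PySem.List.insertBy (fun a b => decide (a.1 < b.1)) x ys := rfl
    rw [e]
    by_cases hxy : x.1 < y.1
    · rw [if_pos (by simpa using hxy)]
      refine List.Pairwise.cons ?_ hs
      intro z hz
      rcases List.mem_cons.mp hz with rfl | hz
      · exact Or.inl hxy
      · rcases List.rel_of_pairwise_cons hs hz with h | ⟨h, _⟩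
        · exact Or.inl (by omega)
        · exact Or.inl (by omega)
    · rw [if_neg (by simpa using hxy)]
      refine List.Pairwise.cons ?_ (ih (List.pairwise_cons.mp hs).2
        (fun z hz => hgt z (List.mem_cons_of_mem y hz)))
      intro z hz
      rw [PySem.List.mem_insertBy] at hz
      rcases hz with rfl | hz
      · rcases lt_or_eq_of_le (by omega : y.1 ≤ z.1) with h | h
        · exact Or.inl h
        · exact Or.inr ⟨h, hgt y (by simp)⟩
      · exact List.rel_of_pairwise_cons hs hz

theorem pvSorted_lex (P : List (Int × Int)) (h : P.Pairwise (fun a b => a.2 < b.2)) :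
    (PySem.List.sorted P (fun p => p.1) false).Pairwise pvLex := by
  induction P using List.reverseRecOn with
  | nil =>
    rw [PySem.List.sorted_eq_foldl_insertBy]
    simp
  | append_singleton xs x ih =>
    rw [PySem.List.sorted_eq_foldl_insertBy, List.foldl_append, List.foldl_cons,
      List.foldl_nil, ← PySem.List.sorted_eq_foldl_insertBy]
    have hs := (List.pairwise_append.mp h).1
    have hgt : ∀ y ∈ xs, y.2 < x.2 := fun y hy =>
      (List.pairwise_append.mp h).2.2 y hy x (by simp)
    exact pvInsertBy_lex x _ (ih hs)
      (fun y hy => hgt y ((PySem.List.mem_sorted _ _ _ _).mp hy))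

theorem pvInit (pw0 : List Int) : pvInv pw0 0 pw0 (pvB_avail pw0) := by
  refine ⟨rfl, ?_, fun j _ _ _ => rfl, ?_⟩
  · unfold pvB_avail
    apply pvSorted_lex
    rw [List.pairwise_map]
    exact List.Pairwise.filter _ (PySem.List.pairwise_lt_enumerate (xs := pw0) (s := 0))
  · intro x
    unfold pvB_avail
    rw [PySem.List.mem_sorted, List.mem_map]
    constructor
    · rintro ⟨q, hq, rfl⟩
      rw [List.mem_filter] at hq
      obtain ⟨hqe, hq2⟩ := hq
      rw [PySem.List.mem_enumerate_iff] at hqe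
      obtain ⟨k, hk, rfl⟩ := hqe
      have h2 : 1 ≤ pw0[k] := by simpa using hq2
      exact ⟨k, hk, Nat.zero_le k, by rwa [pvGetD_int pw0 k hk],
        by simp [List.getD_eq_getElem?_getD, List.getElem?_eq_getElem hk]⟩
    · rintro ⟨j, hjn, _, hjp, rfl⟩
      refine ⟨((j : Int), pw0.getD j 0), ?_, by simp⟩
      rw [List.mem_filter]
      constructor
      · rw [PySem.List.mem_enumerate_iff]
        exact ⟨j, hjn, by simp [List.getD_eq_getElem?_getD, List.getElem?_eq_getElem hjn]⟩
      · simpa using hjp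

-- ===== VERDICT (by name: the statement is the Claim_ definition above) =====
theorem minimumNumberOfTrips_spec : Claim_equal_minimumNumberOfTrips := by
  intro tmw pw _
  unfold Spec_minimumNumberOfTrips minimumNumberOfTrips minimumNumberOfTrips_alt
  rw [List.range_eq_range']
  exact pvOuter tmw pw pw.length 0 pw (pvB_avail pw) 0 (by omega) (pvInit pw)
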